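-- pv_equiv track=rewrite | github.com/JochenHansoul/pxl | 2018/programming essentials/chapters/7_lists/7_opgaven_les/opgave 7.7.py | heart_range_difference
-- ===== SOURCE A (Python) =====
-- def heart_range_difference(list): # opnieuw per deelnemer
--     difference = []
--     for j in range(len(list[0])): # die hebt ge altijd!
--         kl = list[0][j]
--         gr = list[0][j] # nu ga ik in de rest van de rijen kijken of daar een groter element staat of kleiner, het gaat toch elke kolom vertikaal af.
--         for i in range(1, len(list)):
--             if list[i][j] > gr:
--                 gr = list[i][j]
--             elif list[i][j] < kl:
--                 kl = list[i][j]
--         difference.append(gr - kl)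
--     return difference
-- ===== SOURCE B (Python) =====
-- def heart_range_difference(list):
--     mx = list[0][:]
--     mn = list[0][:]
--     for row in list[1:]:
--         mx = [a if a > b else b for a, b in zip(mx, row)]
--         mn = [a if a < b else b for a, b in zip(mn, row)]
--     return [a - b for a, b in zip(mx, mn)]
-- ===== Notes on version B (the rewrite author's own statement) =====
-- stated objective: alternative
-- what changed: B makes a single row-major pass over the matrix, maintaining whole running-max and running-min vectors updated per row by zipping, instead of A's column-major nested scan that recomputes per column index.
import Mathlib
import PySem

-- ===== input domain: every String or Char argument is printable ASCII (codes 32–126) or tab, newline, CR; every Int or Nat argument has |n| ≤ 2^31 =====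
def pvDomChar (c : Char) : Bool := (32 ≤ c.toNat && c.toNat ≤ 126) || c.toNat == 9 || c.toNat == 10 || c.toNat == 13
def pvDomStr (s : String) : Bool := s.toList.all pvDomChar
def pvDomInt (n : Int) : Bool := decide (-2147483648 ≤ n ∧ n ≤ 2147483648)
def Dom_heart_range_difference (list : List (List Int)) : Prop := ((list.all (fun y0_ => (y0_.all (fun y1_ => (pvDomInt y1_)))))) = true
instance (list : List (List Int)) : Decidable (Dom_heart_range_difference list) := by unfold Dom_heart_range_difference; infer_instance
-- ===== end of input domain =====

-- B replaces A's column-major nested scan (outer loop over column indices, inner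
-- manual running max/min over rows) by a single row-major pass that maintains
-- whole running-max and running-min vectors, updated per row by zipping; same cost.

-- ===== PORT A =====
-- inner loop: for i in range(1, len(list)): update (gr, kl) from list[i][j]
def hrdInner (list : List (List Int)) (j : Int) (gk : Int × Int) : Int × Int :=
  (PySem.List.pyRange 1 (list.length : Int) 1).foldl
    (fun gk i =>
      let x := PySem.List.pyGetD (PySem.List.pyGetD list i []) j 0
      if x > gk.1 then (x, gk.2)
      else if x < gk.2 then (gk.1, x)
      else gk) gk

def heart_range_difference (list : List (List Int)) : List Int :=
  (PySem.List.pyRange 0 ((PySem.List.pyGetD list 0 []).length : Int) 1).foldl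
    (fun difference j =>
      let kl := PySem.List.pyGetD (PySem.List.pyGetD list 0 []) j 0
      let gr := PySem.List.pyGetD (PySem.List.pyGetD list 0 []) j 0
      let gk := hrdInner list j (gr, kl)
      difference ++ [gk.1 - gk.2]) []

-- ===== PORT B =====
-- per-row update of the running (max-vector, min-vector) pair, as in Source B's loop body
def hrdStep (p : List Int × List Int) (row : List Int) : List Int × List Int :=
  (List.zipWith (fun a b => if a > b then a else b) p.1 row,
   List.zipWith (fun a b => if a < b then a else b) p.2 row)

def heart_range_difference_alt (list : List (List Int)) : List Int :=
  match list with
  | [] => []  -- unreachable under Pre_: list[0] raises in Python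
  | r :: rs =>
    let p := rs.foldl hrdStep (r, r)
    List.zipWith (fun a b => a - b) p.1 p.2

-- ===== PRECONDITION & SPEC =====
-- Pre_ excludes exactly the inputs where A raises IndexError: the empty matrix
-- (list[0] fails) and ragged matrices where some row is shorter than the first row.
def Pre_heart_range_difference (list : List (List Int)) : Prop :=
  list ≠ [] ∧ ∀ row ∈ list, list.headI.length ≤ row.length
instance (list : List (List Int)) : Decidable (Pre_heart_range_difference list) := by
  unfold Pre_heart_range_difference; infer_instance

def pvWitness_heart_range_difference : List (List Int) := [[1, 2, 3], [0, 5, -1]]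

def Spec_heart_range_difference (list : List (List Int)) (out : List Int) : Prop := out = heart_range_difference_alt list
instance (list : List (List Int)) (out : List Int) : Decidable (Spec_heart_range_difference list out) := by unfold Spec_heart_range_difference; infer_instance

-- ===== CLAIM (what is proved, stated in full; the proofs are below) =====
def Claim_equal_heart_range_difference : Prop := ∀ (list : List (List Int)), Dom_heart_range_difference list → Pre_heart_range_difference list → Spec_heart_range_difference list (heart_range_difference list)

-- ===== LEMMAS AND PROOFS =====

-- A's inner update fold computes the running max and min per column
theorem foldl_minmax {α : Type} (g : α → Int) (l : List α) :
    ∀ (gr kl : Int), kl ≤ gr →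
    l.foldl (fun (gk : Int × Int) row =>
        if g row > gk.1 then (g row, gk.2)
        else if g row < gk.2 then (gk.1, g row)
        else gk) (gr, kl)
      = (l.foldl (fun a row => max a (g row)) gr, l.foldl (fun a row => min a (g row)) kl) := by
  induction l with
  | nil => intro gr kl _; rfl
  | cons row t ih =>
    intro gr kl hkg
    simp only [List.foldl_cons]
    have hstep : (if g row > gr then (g row, kl) else if g row < kl then (gr, g row) else (gr, kl))
        = (max gr (g row), min kl (g row)) := by
      split_ifs <;> simp <;> omega
    rw [hstep]
    exact ih (max gr (g row)) (min kl (g row))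
      (le_trans (min_le_left _ _) (le_trans hkg (le_max_left _ _)))

-- canonical column form both sides are reduced to
def hrdCanon (r : List Int) (rs : List (List Int)) : List Int :=
  (List.range r.length).map (fun j =>
    rs.foldl (fun a row => max a (row.getD j 0)) (r.getD j 0)
    - rs.foldl (fun a row => min a (row.getD j 0)) (r.getD j 0))

theorem A_canon (r : List Int) (rs : List (List Int)) :
    heart_range_difference (r :: rs) = hrdCanon r rs := by
  unfold heart_range_difference hrdCanon
  simp only [PySem.List.pyGetD_zero_cons]
  rw [PySem.List.pyRange_zero_natCast]
  rw [List.foldl_map]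
  rw [PySem.List.foldl_append_singleton_eq_map]
  simp only [List.nil_append]
  apply List.map_congr_left
  intro j hj
  simp only [List.mem_range] at hj
  unfold hrdInner
  have hrow : ∀ (row : List Int), PySem.List.pyGetD row ((j : Nat) : Int) 0 = row.getD j 0 :=
    fun row => PySem.List.pyGetD_natCast row j 0
  simp only [hrow]
  rw [PySem.List.foldl_pyRange_pyGetD' (r :: rs) []
      (fun (gk : Int × Int) row =>
        if row.getD j 0 > gk.1 then (row.getD j 0, gk.2)
        else if row.getD j 0 < gk.2 then (gk.1, row.getD j 0)
        else gk)
      (r.getD j 0, r.getD j 0) (by omega : (0 : Int) ≤ 1)]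
  simp only [Int.toNat_one, List.drop_one, List.tail_cons]
  rw [foldl_minmax (fun row => row.getD j 0) rs _ _ (le_refl _)]

-- a row-major fold of elementwise zipWith equals the column-major fold, per column
theorem foldl_zipWith_cols (f : Int → Int → Int) :
    ∀ (rs : List (List Int)) (m : List Int), (∀ row ∈ rs, m.length ≤ row.length) →
    rs.foldl (fun m row => List.zipWith f m row) m
      = (List.range m.length).map (fun j => rs.foldl (fun a row => f a (row.getD j 0)) (m.getD j 0)) := by
  intro rs
  induction rs with
  | nil =>
    intro m _
    apply List.ext_getElem
    · simp
    · intro i h1 h2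
      simp only [List.foldl_nil] at h1
      simp only [List.foldl_nil, List.getElem_map, List.getElem_range]
      exact (List.getD_eq_getElem m 0 h1).symm
  | cons row t ih =>
    intro m h
    have hlen : (List.zipWith f m row).length = m.length := by
      have := h row (by simp)
      simp [List.length_zipWith]; omega
    rw [List.foldl_cons, ih (List.zipWith f m row) (by
      intro row' hrow'
      rw [hlen]; exact h row' (List.mem_cons_of_mem _ hrow'))]
    rw [hlen]
    apply List.map_congr_left
    intro j hj
    simp only [List.mem_range] at hj
    simp only [List.foldl_cons]
    congr 1
    have hjr : j < row.length := lt_of_lt_of_le hj (h row (by simp))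
    rw [List.getD_eq_getElem _ _ (by rw [hlen]; exact hj),
        List.getD_eq_getElem _ _ hj, List.getD_eq_getElem _ _ hjr]
    simp [List.getElem_zipWith]

theorem foldl_hrdStep (rs : List (List Int)) (mx mn : List Int) :
    rs.foldl hrdStep (mx, mn)
      = (rs.foldl (fun m row => List.zipWith (fun a b => if a > b then a else b) m row) mx,
         rs.foldl (fun m row => List.zipWith (fun a b => if a < b then a else b) m row) mn) := by
  induction rs generalizing mx mn with
  | nil => rfl
  | cons row t ih => simp only [List.foldl_cons, hrdStep, ih]

theorem B_canon (r : List Int) (rs : List (List Int))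
    (h : ∀ row ∈ rs, r.length ≤ row.length) :
    heart_range_difference_alt (r :: rs) = hrdCanon r rs := by
  simp only [heart_range_difference_alt, foldl_hrdStep]
  rw [foldl_zipWith_cols _ rs r h, foldl_zipWith_cols _ rs r h]
  unfold hrdCanon
  apply List.ext_getElem
  · simp
  · intro j h1 h2
    simp only [List.getElem_zipWith, List.getElem_map, List.getElem_range]
    have e1 : List.foldl (fun (a : Int) (row : List Int) => if a > row.getD j 0 then a else row.getD j 0) (r.getD j 0) rs
        = List.foldl (fun a row => max a (row.getD j 0)) (r.getD j 0) rs := by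
      congr 1; funext a row; rw [max_def]; split_ifs <;> omega
    have e2 : List.foldl (fun (a : Int) (row : List Int) => if a < row.getD j 0 then a else row.getD j 0) (r.getD j 0) rs
        = List.foldl (fun a row => min a (row.getD j 0)) (r.getD j 0) rs := by
      congr 1; funext a row; rw [min_def]; split_ifs <;> omega
    rw [e1, e2]

-- ===== VERDICT (by name: the statement is the Claim_ definition above) =====
theorem heart_range_difference_spec : Claim_equal_heart_range_difference := by
  intro list _ hpre
  obtain ⟨hne, hrows⟩ := hpre
  unfold Spec_heart_range_difference
  cases list with
  | nil => exact absurd rfl hne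
  | cons r rs =>
    have h : ∀ row ∈ rs, r.length ≤ row.length := fun row hrow => by
      have := hrows row (List.mem_cons_of_mem _ hrow); simpa using this
    rw [A_canon r rs, B_canon r rs h]
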